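-- pv_equiv track=rewrite | github.com/dan-sazonov/olymp-playground | ЕГЭ/22/15636.py | f
-- ===== SOURCE A (Python) =====
-- def f(x):
--     L = 0
--     M = 0
--     while x > 0:
--         L = L + 1
--         if (x % 2) != 0:
--             M = M + x % 8
--         x = x // 8
--     return (L, M)
--
-- x = 0
-- ===== SOURCE B (Python) =====
-- def f(x):
--     if x <= 0:
--         return (0, 0)
--     digits = oct(x)[2:]
--     return (len(digits), sum(int(d) for d in digits if int(d) % 2))
-- ===== Notes on version B (the rewrite author's own statement) =====
-- stated objective: idiomatic
-- what changed: B builds the whole octal representation at once with oct(x) and does one pass over the digit string, instead of A's arithmetic digit-extraction loop that tests the number's parity each step.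
import Mathlib
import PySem

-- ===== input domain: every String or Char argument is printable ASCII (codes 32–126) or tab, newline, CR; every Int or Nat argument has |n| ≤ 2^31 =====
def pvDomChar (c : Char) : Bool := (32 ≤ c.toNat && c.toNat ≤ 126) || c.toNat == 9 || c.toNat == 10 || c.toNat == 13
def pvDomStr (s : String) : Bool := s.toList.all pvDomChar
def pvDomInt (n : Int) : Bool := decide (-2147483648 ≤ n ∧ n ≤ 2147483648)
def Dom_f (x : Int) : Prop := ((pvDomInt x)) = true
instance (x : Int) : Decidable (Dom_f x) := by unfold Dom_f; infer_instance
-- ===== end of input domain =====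

-- B builds the whole octal digit list at once and sums the odd digits in one pass,
-- instead of A's while-loop that extracts digits arithmetically and tests the number's parity each step.


-- ===== PORT A =====
-- A's while-loop, state (x, L, M)
def fLoop (x L M : Int) : Int × Int :=
  if h : x > 0 then
    fLoop (PySem.Int.floordiv x 8) (L + 1)
      (if PySem.Int.mod x 2 ≠ 0 then M + PySem.Int.mod x 8 else M)
  else (L, M)
termination_by x.toNat
decreasing_by
  rw [PySem.Int.floordiv_eq_ediv_of_pos (by norm_num)]
  omega

def f (x : Int) : Int × Int := fLoop x 0 0

-- ===== PORT B =====
-- port of the oct(x)[2:] library call: the octal digits of x, most significant first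
def octDigits (x : Int) : List Int :=
  if h : x > 0 then octDigits (x / 8) ++ [x % 8] else []
termination_by x.toNat
decreasing_by omega

def f_alt (x : Int) : Int × Int :=
  if x ≤ 0 then (0, 0)
  else
    let ds := octDigits x
    ((ds.length : Int), (ds.filter (fun d => d % 2 ≠ 0)).sum)

-- ===== PRECONDITION & SPEC =====
def Spec_f (x : Int) (out : Int × Int) : Prop := out = f_alt x
instance (x : Int) (out : Int × Int) : Decidable (Spec_f x out) := by unfold Spec_f; infer_instance

-- ===== CLAIM (what is proved, stated in full; the proofs are below) =====
def Claim_equal_f : Prop := ∀ (x : Int), Dom_f x → Spec_f x (f x)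

-- ===== LEMMAS AND PROOFS =====
lemma octDigits_nonpos {x : Int} (h : ¬ x > 0) : octDigits x = [] := by
  rw [octDigits]; simp [h]

lemma fLoop_eq (x : Int) : ∀ (L M : Int),
    fLoop x L M = (L + ((octDigits x).length : Int),
                   M + ((octDigits x).filter (fun d => d % 2 ≠ 0)).sum) := by
  intro L M
  by_cases h : x > 0
  · rw [fLoop, octDigits]
    simp only [h, dif_pos]
    rw [PySem.Int.floordiv_eq_ediv_of_pos (by norm_num : (0:Int) < 8),
        PySem.Int.mod_eq_emod_of_pos (by norm_num : (0:Int) < 2),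
        PySem.Int.mod_eq_emod_of_pos (by norm_num : (0:Int) < 8)]
    rw [fLoop_eq (x / 8)]
    have hmod : x % 8 % 2 = x % 2 := Int.emod_emod_of_dvd x (by norm_num)
    rcases eq_or_ne (x % 2) 0 with hodd | hodd
    · have h1 : x % 8 % 2 = 0 := by rw [hmod]; exact hodd
      simp [hodd, h1, List.filter_append, List.sum_append]
      push_cast; ring
    · have h1 : x % 8 % 2 = 1 := by
        have := Int.emod_emod_of_dvd x (by norm_num : (2:Int) ∣ 8)
        omega
      simp [hodd, h1, List.filter_append, List.sum_append]
      constructor <;> [push_cast; skip] <;> ring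
  · rw [fLoop, octDigits_nonpos h]
    simp [h]
termination_by x.toNat
decreasing_by omega

-- ===== VERDICT (by name: the statement is the Claim_ definition above) =====
theorem f_spec : Claim_equal_f := by
  intro x _
  show f x = f_alt x
  unfold f f_alt
  rw [fLoop_eq]
  by_cases h : x ≤ 0
  · rw [octDigits_nonpos (by omega)]; simp [h]
  · simp [h]
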